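-- pv_equiv track=rewrite | github.com/Sarbatore/RDR-LUA-Converter | main.py | ToRedMNative
-- ===== SOURCE A (Python) =====
-- def ToRedMNative(s):
--     # Return a Citizen.InvokeNative if the native is a hash
--     if (s.startswith("_0x")):
--         return "Citizen.InvokeNative(" + s[1:] + ", "
--
--     # Remove the underscore if the native starts with it
--     if (s.startswith("_")):
--         s = s[1:]
--
--     result = []
--     capitalize_next = True
--
--     # Capitalize the first letter after underscore
--     for char in s:
--         if char == "_":
--             capitalize_next = True
--
--         else:
--             if capitalize_next:
--                 result.append(char.upper())
--                 capitalize_next = False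
--
--             else:
--                 result.append(char.lower())
--
--     return "".join(result)
-- ===== SOURCE B (Python) =====
-- def ToRedMNative(s):
--     # Return a Citizen.InvokeNative if the native is a hash
--     if s.startswith("_0x"):
--         return "Citizen.InvokeNative(" + s[1:] + ", "
--     # Split into words and capitalize each; empty segments contribute nothing.
--     return "".join(p[:1].upper() + p[1:].lower() for p in s.split("_"))
-- ===== Notes on version B (the rewrite author's own statement) =====
-- stated objective: faster
-- what changed: Replaces the character-by-character scan with a capitalize_next flag by splitting on '_' and rebuilding each segment as p[:1].upper()+p[1:].lower(); the work moves into C-level str methods.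
import Mathlib
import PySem

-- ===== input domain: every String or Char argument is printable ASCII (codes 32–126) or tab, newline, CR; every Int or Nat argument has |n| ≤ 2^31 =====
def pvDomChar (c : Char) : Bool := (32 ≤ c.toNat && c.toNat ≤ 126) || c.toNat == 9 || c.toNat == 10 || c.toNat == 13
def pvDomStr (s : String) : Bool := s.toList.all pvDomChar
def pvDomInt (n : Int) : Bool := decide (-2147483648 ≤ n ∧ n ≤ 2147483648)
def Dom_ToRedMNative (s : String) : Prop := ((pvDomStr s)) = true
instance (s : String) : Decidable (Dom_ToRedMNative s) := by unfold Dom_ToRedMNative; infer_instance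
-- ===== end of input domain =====

-- B rebuilds the name by splitting on underscores and capitalizing each segment independently,
-- instead of A's character scan with a capitalize_next flag (measured faster in Python: split/upper/lower do the work).


-- ===== PORT A =====
def ToRedMNative (s : String) : String :=
  if PySem.Str.startswith s "_0x" then
    "Citizen.InvokeNative(" ++ PySem.Str.slice s (some 1) none ++ ", "
  else
    let s1 := if PySem.Str.startswith s "_" then PySem.Str.slice s (some 1) none else s
    -- the for loop: state = (result, capitalize_next)
    let st := s1.toList.foldl
      (fun (st : List Char × Bool) c =>
        if c = '_' then (st.1, true)
        else if st.2 then (st.1 ++ [PySem.Chars.upperChar c], false)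
        else (st.1 ++ [PySem.Chars.lowerChar c], false))
      ([], true)
    String.ofList st.1

-- ===== PORT B =====
def ToRedMNative_alt (s : String) : String :=
  if PySem.Str.startswith s "_0x" then
    "Citizen.InvokeNative(" ++ PySem.Str.slice s (some 1) none ++ ", "
  else
    match PySem.Str.split? s "_" with
    | none => ""  -- unreachable: the separator "_" is nonempty
    | some parts =>
      PySem.Str.join "" (parts.map (fun p =>
        PySem.Str.upper (PySem.Str.slice p none (some 1)) ++
          PySem.Str.lower (PySem.Str.slice p (some 1) none)))

-- ===== PRECONDITION & SPEC =====
def Spec_ToRedMNative (s : String) (out : String) : Prop := out = ToRedMNative_alt s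
instance (s : String) (out : String) : Decidable (Spec_ToRedMNative s out) := by unfold Spec_ToRedMNative; infer_instance

-- ===== CLAIM (what is proved, stated in full; the proofs are below) =====
def Claim_equal_ToRedMNative : Prop := ∀ (s : String), Dom_ToRedMNative s → Spec_ToRedMNative s (ToRedMNative s)

-- ===== LEMMAS AND PROOFS =====

-- structural version of s.split('_') used only by the proofs
def split1 : List Char → List (List Char)
  | [] => [[]]
  | c :: t =>
    if c = '_' then [] :: split1 t
    else
      match split1 t with
      | [] => [[c]]
      | h :: r => (c :: h) :: r

theorem split1_ne_nil (l : List Char) : split1 l ≠ [] := by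
  cases l with
  | nil => simp [split1]
  | cons c t =>
    simp only [split1]
    split_ifs
    · simp
    · cases h : split1 t <;> simp

theorem splitOn_go_eq (l : List Char) : ∀ (fuel : Nat) (cur : List Char)
    (acc : List (List Char)), l.length ≤ fuel →
    PySem.Chars.splitOn.go ['_'] fuel l cur acc =
      acc.reverse ++ (split1 l).modifyHead (cur.reverse ++ ·) := by
  induction l with
  | nil =>
    intro fuel cur acc _
    cases fuel <;> simp [PySem.Chars.splitOn.go, split1]
  | cons c t ih =>
    intro fuel cur acc hlen
    cases fuel with
    | zero => simp at hlen
    | succ f =>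
      by_cases hc : c = '_'
      · subst hc
        have hpre : (['_'] : List Char).isPrefixOf ('_' :: t) = true := by simp
        rw [show PySem.Chars.splitOn.go ['_'] (f+1) ('_' :: t) cur acc =
              PySem.Chars.splitOn.go ['_'] f t [] (cur.reverse :: acc) by
            simp [PySem.Chars.splitOn.go, hpre]]
        rw [ih f [] (cur.reverse :: acc) (by simpa using hlen)]
        cases h : split1 t <;> simp [split1, List.modifyHead, h]
      · have hpre : (['_'] : List Char).isPrefixOf (c :: t) = false := by
          simp [List.isPrefixOf]
          intro h; exact hc h.symm
        rw [show PySem.Chars.splitOn.go ['_'] (f+1) (c :: t) cur acc =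
              PySem.Chars.splitOn.go ['_'] f t (c :: cur) acc by
            simp [PySem.Chars.splitOn.go, hpre]]
        rw [ih f (c :: cur) acc (by simpa using hlen)]
        simp only [split1, if_neg hc]
        cases h : split1 t with
        | nil => exact absurd h (split1_ne_nil t)
        | cons h0 r => simp

theorem splitOn_eq_split1 (l : List Char) :
    PySem.Chars.splitOn l ['_'] = split1 l := by
  rw [show PySem.Chars.splitOn l ['_'] =
        PySem.Chars.splitOn.go ['_'] (l.length + 1) l [] [] from rfl]
  rw [splitOn_go_eq l (l.length + 1) [] [] (by omega)]
  cases h : split1 l with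
  | nil => exact absurd h (split1_ne_nil l)
  | cons h0 r => simp

-- each segment's contribution in B, on the list side
def capSeg (p : List Char) : List Char :=
  PySem.Chars.upper (p.take 1) ++ PySem.Chars.lower (p.drop 1)

-- A's loop body
def stepA (st : List Char × Bool) (c : Char) : List Char × Bool :=
  if c = '_' then (st.1, true)
  else if st.2 then (st.1 ++ [PySem.Chars.upperChar c], false)
  else (st.1 ++ [PySem.Chars.lowerChar c], false)

-- the loop invariant: result of A's scan ≡ B's segment decomposition
theorem foldA_eq (l : List Char) : ∀ res : List Char,
    (l.foldl stepA (res, true)).1 = res ++ ((split1 l).map capSeg).flatten ∧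
    (l.foldl stepA (res, false)).1 =
      res ++ PySem.Chars.lower (split1 l).headI ++
        (((split1 l).tail).map capSeg).flatten := by
  induction l with
  | nil => intro res; simp [split1, capSeg, PySem.Chars.upper, PySem.Chars.lower]
  | cons c t ih =>
    intro res
    by_cases hc : c = '_'
    · subst hc
      have hstep : ∀ b, (('_' :: t).foldl stepA (res, b)).1 = (t.foldl stepA (res, true)).1 := by
        intro b; simp [stepA]
      constructor
      · rw [hstep, (ih res).1]
        simp [split1, capSeg, PySem.Chars.upper, PySem.Chars.lower]
      · rw [hstep, (ih res).1]
        simp [split1, PySem.Chars.lower]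
    · cases h : split1 t with
      | nil => exact absurd h (split1_ne_nil t)
      | cons h0 r =>
        constructor
        · simp only [List.foldl_cons, stepA, if_neg hc]
          have h2 := (ih (res ++ [PySem.Chars.upperChar c])).2
          rw [h, List.headI, List.tail] at h2
          simp only [split1, if_neg hc, h]
          simp [h2, capSeg, PySem.Chars.upper, PySem.Chars.lower]
        · simp only [List.foldl_cons, stepA, if_neg hc]
          have h2 := (ih (res ++ [PySem.Chars.lowerChar c])).2
          rw [h, List.headI, List.tail] at h2
          simp only [split1, if_neg hc, h]
          simp [h2, PySem.Chars.lower]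

-- B's list-side value, after unfolding the Str wrappers
theorem alt_toList (s : String) (h : PySem.Str.startswith s "_0x" = false) :
    (ToRedMNative_alt s).toList = ((split1 s.toList).map capSeg).flatten := by
  unfold ToRedMNative_alt
  rw [h]
  simp only [Bool.false_eq_true, if_false]
  have hsplit : PySem.Str.split? s "_" =
      some ((PySem.Chars.splitOn s.toList ['_']).map String.ofList) := by
    simp [PySem.Str.split?, PySem.Chars.split?]
  rw [hsplit]
  simp only [PySem.Str.toList_join, List.map_map]
  have : ∀ p : List Char,
      (PySem.Str.upper (PySem.Str.slice (String.ofList p) none (some 1)) ++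
        PySem.Str.lower (PySem.Str.slice (String.ofList p) (some 1) none)).toList
      = capSeg p := by
    intro p
    rw [String.toList_append, PySem.Str.toList_upper, PySem.Str.toList_lower,
        PySem.Str.toList_slice, PySem.Str.toList_slice, String.toList_ofList]
    unfold capSeg
    rw [show PySem.Chars.slice p none (some 1) = PySem.List.slice p none (some 1) from rfl,
        show PySem.Chars.slice p (some 1) none = PySem.List.slice p (some 1) none from rfl,
        PySem.List.slice_to p (by norm_num), PySem.List.slice_from p (by norm_num)]
    rfl
  rw [splitOn_eq_split1]
  rw [List.map_congr_left (fun p (_ : p ∈ split1 s.toList) => by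
        simpa [Function.comp] using this p)]
  rw [PySem.Chars.join]
  -- separator is empty: intercalate [] = flatten
  have hint : ∀ (xs : List (List Char)), List.intercalate ([] : List Char) xs = xs.flatten := by
    intro xs
    induction xs with
    | nil => simp [List.intercalate]
    | cons x t iht =>
      cases t with
      | nil => simp [List.intercalate]
      | cons y r =>
        simp only [List.intercalate] at iht ⊢
        simp [List.intersperse] at iht ⊢
        exact iht
  rw [show String.toList "" = ([] : List Char) from rfl, hint]

-- ===== VERDICT (by name: the statement is the Claim_ definition above) =====
theorem ToRedMNative_spec : Claim_equal_ToRedMNative := by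
  intro s _
  unfold Spec_ToRedMNative
  by_cases h0 : PySem.Str.startswith s "_0x" = true
  · unfold ToRedMNative ToRedMNative_alt
    rw [h0]
    rfl
  · have h0' : PySem.Str.startswith s "_0x" = false := by
      simpa using h0
    apply String.toList_inj.mp
    rw [alt_toList s h0']
    unfold ToRedMNative
    rw [h0']
    simp only [Bool.false_eq_true, if_false, String.toList_ofList]
    by_cases hu : PySem.Str.startswith s "_" = true
    · -- s starts with '_' : s.toList = '_' :: rest, and the scan ignores it
      obtain ⟨rest, hrest⟩ := (PySem.Chars.startswith_iff s.toList "_".toList).mp hu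
      have hrest' : s.toList = '_' :: rest := by
        simpa using hrest.symm
      rw [if_pos hu, PySem.Str.toList_slice,
          show PySem.Chars.slice s.toList (some 1) none
              = PySem.List.slice s.toList (some 1) none from rfl,
          PySem.List.slice_from s.toList (by norm_num), hrest']
      rw [show List.drop (Int.toNat 1) ('_' :: rest) = rest from rfl]
      rw [show (fun (st : List Char × Bool) c =>
            if c = '_' then (st.1, true)
            else if st.2 then (st.1 ++ [PySem.Chars.upperChar c], false)
            else (st.1 ++ [PySem.Chars.lowerChar c], false)) = stepA from rfl]
      rw [(foldA_eq rest []).1]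
      simp [split1, capSeg, PySem.Chars.upper, PySem.Chars.lower]
    · rw [if_neg hu]
      rw [show (fun (st : List Char × Bool) c =>
            if c = '_' then (st.1, true)
            else if st.2 then (st.1 ++ [PySem.Chars.upperChar c], false)
            else (st.1 ++ [PySem.Chars.lowerChar c], false)) = stepA from rfl]
      rw [(foldA_eq s.toList []).1]
      simp
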